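-- pv_equiv track=rewrite | github.com/fg0611/techstackmastering | adv-langs/py-adv/may11/sliding_window_unfixed.py | sw_unfixed
-- ===== SOURCE A (Python) =====
-- def sw_unfixed(ls):
--     if not ls:
--         return None
--     long = 1
--     start = 0
--     i = 1
--     e = 0
--
--     while i < len(ls):
--         e+=1
--         if ls[start] != ls[i]:
--             long = max(long, len(ls[start:i+1]))
--             i += 1
--         else:
--             start += 1
--             i = start+1
--
--     return long, e
-- ===== SOURCE B (Python) =====
-- def sw_unfixed(ls):
--     # O(n): precompute next-equal index per position, then one pass over phases.
--     if not ls: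
--         return None
--     n = len(ls)
--     nxt = [n] * n
--     last = {}
--     for k in range(n - 1, -1, -1):
--         v = ls[k]
--         if v in last:
--             nxt[k] = last[v]
--         last[v] = k
--     long = 1
--     e = 0
--     s = 0
--     while nxt[s] < n:
--         long = max(long, nxt[s] - s)
--         e += nxt[s] - s
--         s += 1
--     return max(long, n - s), e + (n - 1 - s)
-- ===== Notes on version B (the rewrite author's own statement) =====
-- stated objective: faster
-- what changed: B precomputes a next-equal-index table with a dict in one backwards pass and then sums each phase's window length and iteration count in a single forward pass, instead of A's restart-rescanning while loop.
import Mathlib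
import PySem

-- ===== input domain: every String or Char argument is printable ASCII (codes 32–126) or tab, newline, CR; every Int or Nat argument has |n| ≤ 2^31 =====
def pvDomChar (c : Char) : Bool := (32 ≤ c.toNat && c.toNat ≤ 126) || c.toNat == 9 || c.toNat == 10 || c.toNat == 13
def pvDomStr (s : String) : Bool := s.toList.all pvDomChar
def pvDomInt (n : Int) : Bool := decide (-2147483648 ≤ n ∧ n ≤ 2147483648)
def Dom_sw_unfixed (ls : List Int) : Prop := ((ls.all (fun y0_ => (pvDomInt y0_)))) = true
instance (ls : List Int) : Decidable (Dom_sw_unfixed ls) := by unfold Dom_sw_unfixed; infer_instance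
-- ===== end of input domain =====

-- B replaces A's quadratic restart-scanning loop by an O(n) pass over a precomputed
-- next-equal-index table; equivalence of return values is proved for all inputs.

-- ===== PORT A =====
-- A's while loop; the proof argument h (start < i) is a loop invariant of A used only
-- for termination.  Indices are always in range (start < i < len), so Python's ls[start]
-- and ls[i] are ported exactly by getD; len(ls[start:i+1]) is the PySem slice length.
def loopA (ls : List Int) (long start i e : Nat) (h : start < i) : Int × Int :=
  if hi : i < ls.length then
    if ls.getD start 0 ≠ ls.getD i 0 then
      loopA ls (max long (PySem.List.slice ls (some (start : Int)) (some ((i : Int) + 1))).length)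
        start (i + 1) (e + 1) (by omega)
    else
      loopA ls long (start + 1) (start + 2) (e + 1) (by omega)
  else ((long : Int), (e : Int))
termination_by (ls.length - start, ls.length - i)
decreasing_by
  · exact Prod.Lex.right _ (by omega)
  · exact Prod.Lex.left _ _ (by omega)

def sw_unfixed (ls : List Int) : Option (Int × Int) :=
  if ls = [] then none
  else some (loopA ls 1 0 1 0 (by omega))

-- ===== PORT B =====
-- one step of B's backwards loop "for k in range(n-1, -1, -1)" filling nxt via the dict `last`
def bStep (ls : List Int) (st : List Nat × PySem.Dict Int Nat) (k : Nat) :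
    List Nat × PySem.Dict Int Nat :=
  let v := ls.getD k 0
  let nxt := match st.2.get? v with
    | some j => st.1.set k j      -- if v in last: nxt[k] = last[v]
    | none => st.1
  (nxt, st.2.insert v k)          -- last[v] = k

-- nxt = [n]*n;  for k in range(n-1, -1, -1): …   ((range n).reverse = [n-1, …, 0])
def buildNxt (ls : List Int) : List Nat :=
  ((List.range ls.length).reverse.foldl (bStep ls)
    (List.replicate ls.length ls.length, (PySem.Dict.empty : PySem.Dict Int Nat))).1

-- B's while loop: while nxt[s] < n: …  (s stays < n, so getD with default n is exact)
def loopB (ls : List Int) (nxt : List Nat) (s long e : Nat) : Int × Int :=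
  if h : nxt.getD s ls.length < ls.length then
    loopB ls nxt (s + 1) (max long (nxt.getD s ls.length - s)) (e + (nxt.getD s ls.length - s))
  else (((max long (ls.length - s) : Nat) : Int), ((e + (ls.length - 1 - s) : Nat) : Int))
termination_by nxt.length - s
decreasing_by
  have hs : s < nxt.length := by
    by_cases hc : s < nxt.length
    · exact hc
    · rw [List.getD_eq_default _ _ (by omega)] at h; omega
  omega

def sw_unfixed_alt (ls : List Int) : Option (Int × Int) :=
  if ls = [] then none
  else some (loopB ls (buildNxt ls) 0 1 0)

-- ===== PRECONDITION & SPEC =====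
def Spec_sw_unfixed (ls : List Int) (out : Option (Int × Int)) : Prop := out = sw_unfixed_alt ls
instance (ls : List Int) (out : Option (Int × Int)) : Decidable (Spec_sw_unfixed ls out) := by unfold Spec_sw_unfixed; infer_instance

-- ===== CLAIM (what is proved, stated in full; the proofs are below) =====
def Claim_equal_sw_unfixed : Prop := ∀ (ls : List Int), Dom_sw_unfixed ls → Spec_sw_unfixed ls (sw_unfixed ls)

-- ===== LEMMAS AND PROOFS =====

-- first index j ≥ i with ls[j] = v, or ls.length if none (specification of B's nxt table)
def fEq (ls : List Int) (v : Int) (i : Nat) : Nat :=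
  if _h : i < ls.length then (if ls.getD i 0 = v then i else fEq ls v (i + 1))
  else ls.length
termination_by ls.length - i

lemma le_fEq (ls : List Int) (v : Int) : ∀ m i, ls.length - i ≤ m →
    fEq ls v i < ls.length → i ≤ fEq ls v i := by
  intro m
  induction m with
  | zero =>
    intro i hm hlt
    rw [fEq] at hlt ⊢
    rw [dif_neg (by omega)] at hlt
    omega
  | succ m ih =>
    intro i hm hlt
    rw [fEq] at hlt ⊢
    by_cases hin : i < ls.length
    · rw [dif_pos hin] at hlt ⊢
      by_cases heq : ls.getD i 0 = v
      · rw [if_pos heq]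
      · rw [if_neg heq] at hlt ⊢
        have := ih (i + 1) (by omega) hlt
        omega
    · rw [dif_neg hin] at hlt
      omega

lemma fEq_le (ls : List Int) (v : Int) : ∀ m i, ls.length - i ≤ m → fEq ls v i ≤ ls.length := by
  intro m
  induction m with
  | zero =>
    intro i hm
    rw [fEq]
    by_cases hin : i < ls.length
    · rw [dif_pos hin]
      by_cases heq : ls.getD i 0 = v
      · rw [if_pos heq]; omega
      · omega
    · rw [dif_neg hin]
  | succ m ih =>
    intro i hm
    rw [fEq]
    by_cases hin : i < ls.length
    · rw [dif_pos hin]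
      by_cases heq : ls.getD i 0 = v
      · rw [if_pos heq]; omega
      · rw [if_neg heq]; exact ih (i + 1) (by omega)
    · rw [dif_neg hin]

lemma le_fEq' (ls : List Int) (v : Int) (i : Nat) (h : fEq ls v i < ls.length) :
    i ≤ fEq ls v i :=
  le_fEq ls v (ls.length - i) i le_rfl h

lemma fEq_le' (ls : List Int) (v : Int) (i : Nat) : fEq ls v i ≤ ls.length :=
  fEq_le ls v (ls.length - i) i le_rfl

-- A's loop restated phase by phase (used only in the proofs)
def loopBspec (ls : List Int) (s long e : Nat) : Int × Int :=
  if _h : fEq ls (ls.getD s 0) (s + 1) < ls.length then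
    loopBspec ls (s + 1) (max long (fEq ls (ls.getD s 0) (s + 1) - s))
      (e + (fEq ls (ls.getD s 0) (s + 1) - s))
  else (((max long (ls.length - s) : Nat) : Int), ((e + (ls.length - 1 - s) : Nat) : Int))
termination_by ls.length - s
decreasing_by
  have := le_fEq' ls (ls.getD s 0) (s + 1) _h
  omega

lemma slice_len (ls : List Int) (s i : Nat) (hsi : s < i) (hi : i < ls.length) :
    (PySem.List.slice ls (some (s : Int)) (some ((i : Int) + 1))).length = i + 1 - s := by
  have h : ((i : Int) + 1) = ((i + 1 : Nat) : Int) := by push_cast; ring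
  rw [h, PySem.List.slice_natCast]
  rw [List.length_take, List.length_drop]
  omega

-- one phase of A's loop: scan from i until the first j ≥ i with ls[j] = ls[s]
lemma phaseA (ls : List Int) (s : Nat) : ∀ m i long e (h : s < i), ls.length - i ≤ m →
    i ≤ ls.length →
    loopA ls long s i e h =
      (if _hf : fEq ls (ls.getD s 0) i < ls.length then
        loopA ls (if i < fEq ls (ls.getD s 0) i then max long (fEq ls (ls.getD s 0) i - s) else long)
          (s + 1) (s + 2) (e + (fEq ls (ls.getD s 0) i - i) + 1) (by omega)
      else (((if i < ls.length then max long (ls.length - s) else long : Nat) : Int),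
            ((e + (ls.length - i) : Nat) : Int))) := by
  intro m
  induction m with
  | zero =>
    intro i long e h hm hi
    have hin : i = ls.length := by omega
    rw [loopA, fEq]
    simp [hin]
  | succ m ih =>
    intro i long e h hm hi
    by_cases hin : i < ls.length
    · rw [loopA]
      simp only [hin, dif_pos]
      by_cases heq : ls.getD i 0 = ls.getD s 0
      · -- equality found at i: fEq = i
        have hf : fEq ls (ls.getD s 0) i = i := by
          rw [fEq, dif_pos hin, if_pos heq]
        rw [if_neg (not_not_intro heq.symm), dif_pos (by omega : fEq ls (ls.getD s 0) i < ls.length)]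
        rw [hf]
        simp
      · -- not equal: fEq i = fEq (i+1), one more scan step
        have hf : fEq ls (ls.getD s 0) i = fEq ls (ls.getD s 0) (i + 1) := by
          rw [fEq, dif_pos hin, if_neg heq]
        rw [if_pos (fun hc => heq hc.symm), slice_len ls s i h hin]
        rw [ih (i + 1) (max long (i + 1 - s)) (e + 1) (by omega) (by omega) (by omega)]
        rw [hf]
        set F := fEq ls (ls.getD s 0) (i + 1) with hF
        by_cases hfn : F < ls.length
        · have hge : i + 1 ≤ F := le_fEq' ls _ (i + 1) hfn
          rw [dif_pos hfn, dif_pos hfn]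
          have h1 : (if i + 1 < F then max (max long (i + 1 - s)) (F - s) else max long (i + 1 - s))
              = (if i < F then max long (F - s) else long) := by
            split <;> split <;> omega
          have h2 : e + 1 + (F - (i + 1)) + 1 = e + (F - i) + 1 := by omega
          rw [h1, h2]
        · rw [dif_neg hfn, dif_neg hfn]
          have hFn : F = ls.length := by
            have := fEq_le' ls (ls.getD s 0) (i + 1)
            omega
          have h1 : (if i + 1 < ls.length then max (max long (i + 1 - s)) (ls.length - s)
                else max long (i + 1 - s)) = (if i < ls.length then max long (ls.length - s) else long) := by
            rw [if_pos hin]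
            split <;> omega
          have h2 : e + 1 + (ls.length - (i + 1)) = e + (ls.length - i) := by omega
          rw [h1, h2]
          simp [hin]
    · have hin' : i = ls.length := by omega
      rw [loopA, fEq]
      simp [hin']

-- A's whole loop from a phase start (i = s+1) equals the phase-by-phase recursion
lemma loopA_eq_spec (ls : List Int) : ∀ m s long e, ls.length - s ≤ m → 1 ≤ long →
    s < ls.length →
    loopA ls long s (s + 1) e (by omega) = loopBspec ls s long e := by
  intro m
  induction m with
  | zero => intro s long e hm hlong hs; omega
  | succ m ih =>
    intro s long e hm hlong hs
    rw [phaseA ls s (ls.length - (s + 1)) (s + 1) long e (by omega) le_rfl (by omega)]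
    set F := fEq ls (ls.getD s 0) (s + 1) with hF
    rw [loopBspec]
    by_cases hfn : F < ls.length
    · have hge : s + 1 ≤ F := le_fEq' ls _ (s + 1) hfn
      rw [dif_pos hfn, dif_pos hfn]
      have h1 : (if s + 1 < F then max long (F - s) else long) = max long (F - s) := by
        split <;> omega
      have h2 : e + (F - (s + 1)) + 1 = e + (F - s) := by omega
      rw [h1, h2]
      exact ih (s + 1) (max long (F - s)) (e + (F - s)) (by omega) (by omega) (by omega)
    · rw [dif_neg hfn, dif_neg hfn]
      have h1 : (if s + 1 < ls.length then max long (ls.length - s) else long)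
          = max long (ls.length - s) := by split <;> omega
      have h2 : e + (ls.length - (s + 1)) = e + (ls.length - 1 - s) := by omega
      rw [h1, h2]

-- B's loop equals the same recursion, given nxt is the next-equal table
lemma loopB_eq_spec (ls : List Int) (nxt : List Nat) (hlen : nxt.length = ls.length)
    (hx : ∀ k, k < ls.length → nxt.getD k ls.length = fEq ls (ls.getD k 0) (k + 1)) :
    ∀ m s long e, nxt.length - s ≤ m → loopB ls nxt s long e = loopBspec ls s long e := by
  intro m
  induction m with
  | zero =>
    intro s long e hm
    have hs : ls.length ≤ s := by omega
    rw [loopB, loopBspec]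
    have h1 : nxt.getD s ls.length = ls.length := List.getD_eq_default _ _ (by omega)
    have h2 : fEq ls (ls.getD s 0) (s + 1) = ls.length := by
      rw [fEq]; rw [dif_neg (by omega)]
    simp only [List.getD] at h1 h2 ⊢
    rw [dif_neg (by rw [h1]; omega), dif_neg (by rw [h2]; omega)]
  | succ m ih =>
    intro s long e hm
    rw [loopB, loopBspec]
    by_cases hs : s < ls.length
    · rw [hx s hs]
      split
      · exact ih (s + 1) _ _ (by omega)
      · rfl
    · have h1 : nxt.getD s ls.length = ls.length := List.getD_eq_default _ _ (by omega)
      have h2 : fEq ls (ls.getD s 0) (s + 1) = ls.length := by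
        rw [fEq]; rw [dif_neg (by omega)]
      simp only [List.getD] at h1 h2 ⊢
      rw [dif_neg (by rw [h1]; omega), dif_neg (by rw [h2]; omega)]

lemma getD_replicate_self (n a k : Nat) : (List.replicate n a).getD k a = a := by
  by_cases hk : k < n
  · rw [List.getD_eq_getElem _ _ (by simpa using hk)]; simp
  · exact List.getD_eq_default _ _ (by simpa using hk)

-- invariant of B's backwards fill loop
lemma set_getD_ne (l : List Nat) (i j a d : Nat) (h : i ≠ j) :
    (l.set i a).getD j d = l.getD j d := by
  unfold List.getD
  rw [List.getElem?_set_ne h]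

lemma build_inv (ls : List Int) : ∀ k0, k0 ≤ ls.length →
    ∀ st : List Nat × PySem.Dict Int Nat,
    st.1.length = ls.length →
    (∀ k, k0 ≤ k → k < ls.length → st.1.getD k ls.length = fEq ls (ls.getD k 0) (k + 1)) →
    (∀ k, k < k0 → st.1.getD k ls.length = ls.length) →
    (∀ v, st.2.get? v = if fEq ls v k0 < ls.length then some (fEq ls v k0) else none) →
    (((List.range k0).reverse.foldl (bStep ls) st).1.length = ls.length ∧
      ∀ k, k < ls.length →
        ((List.range k0).reverse.foldl (bStep ls) st).1.getD k ls.length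
          = fEq ls (ls.getD k 0) (k + 1)) := by
  intro k0
  induction k0 with
  | zero =>
    intro _ st h1 h2 _ _
    simp only [List.range_zero, List.reverse_nil, List.foldl_nil]
    exact ⟨h1, fun k hk => h2 k (Nat.zero_le k) hk⟩
  | succ k0 ih =>
    intro hk0 st h1 h2 h3 h4
    rw [List.range_succ, List.reverse_append]
    simp only [List.reverse_cons, List.reverse_nil, List.nil_append, List.cons_append,
      List.foldl_cons]
    have hk0lt : k0 < ls.length := by omega
    have hself : fEq ls (ls.getD k0 0) k0 = k0 := by
      rw [fEq, dif_pos hk0lt, if_pos rfl]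
    apply ih (by omega)
    · -- length preserved
      simp only [bStep, h4 (ls.getD k0 0)]
      split
      · simpa using h1
      · exact h1
    · -- entries ≥ k0 correct
      intro k hk hkl
      by_cases hkk : k = k0
      · subst hkk
        simp only [bStep, h4 (ls.getD k 0)]
        by_cases hf : fEq ls (ls.getD k 0) (k + 1) < ls.length
        · rw [if_pos hf]
          simp only []
          rw [List.getD_eq_getElem _ _ (by simp [h1, hkl]),
            List.getElem_set_self (by simp [h1, hkl])]
        · rw [if_neg hf]
          simp only []
          have := fEq_le' ls (ls.getD k 0) (k + 1)
          rw [h3 k (by omega)]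
          omega
      · have hk' : k0 + 1 ≤ k := by omega
        simp only [bStep, h4 (ls.getD k0 0)]
        split
        · rw [set_getD_ne _ _ _ _ _ (by omega)]
          exact h2 k hk' hkl
        · exact h2 k hk' hkl
    · -- entries < k0 still default
      intro k hk
      simp only [bStep, h4 (ls.getD k0 0)]
      split
      · rw [set_getD_ne _ _ _ _ _ (by omega)]
        exact h3 k (by omega)
      · exact h3 k (by omega)
    · -- dict invariant moves from k0+1 to k0
      intro v
      simp only [bStep]
      rw [PySem.Dict.get?_insert]
      by_cases hv : v = ls.getD k0 0
      · subst hv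
        rw [if_pos rfl, hself, if_pos hk0lt]
      · rw [if_neg hv]
        have hstep : fEq ls v k0 = fEq ls v (k0 + 1) := by
          rw [fEq, dif_pos hk0lt, if_neg (fun hc => hv hc.symm)]
        rw [h4 v, hstep]

lemma buildNxt_spec (ls : List Int) :
    (buildNxt ls).length = ls.length ∧
      ∀ k, k < ls.length → (buildNxt ls).getD k ls.length = fEq ls (ls.getD k 0) (k + 1) := by
  unfold buildNxt
  apply build_inv ls ls.length le_rfl
  · simp
  · intro k hk hkl; omega
  · intro k hk; exact getD_replicate_self _ _ _
  · intro v
    have h : fEq ls v ls.length = ls.length := by rw [fEq]; rw [dif_neg (by omega)]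
    rw [PySem.Dict.get?_empty, if_neg (by rw [h]; omega)]

-- ===== VERDICT (by name: the statement is the Claim_ definition above) =====
theorem sw_unfixed_spec : Claim_equal_sw_unfixed := by
  intro ls _
  unfold Spec_sw_unfixed sw_unfixed sw_unfixed_alt
  by_cases hnil : ls = []
  · simp [hnil]
  · rw [if_neg hnil, if_neg hnil]
    have hn : 0 < ls.length := List.length_pos_iff.mpr hnil
    congr 1
    rw [loopA_eq_spec ls ls.length 0 1 0 (by omega) le_rfl hn]
    obtain ⟨hlen, hx⟩ := buildNxt_spec ls
    rw [loopB_eq_spec ls (buildNxt ls) hlen hx (buildNxt ls).length 0 1 0 le_rfl]
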